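-- pv_equiv track=rewrite | github.com/seongwon030/algorithm_Term | ALGO/알고리즘/기말/dp/상자쌓기.py | max_stackable_boxes
-- ===== SOURCE A (Python) =====
-- def max_stackable_boxes(weights, capacities):
--     n = len(weights)
--     INF = float('inf')
--
--     # T[i][k]: i번째 상자부터 N까지 중에서 k개를 선택했을 때 최소 위 하중
--     T = [[INF] * (n+1) for _ in range(n+2)]
--
--     # k = 0일 때는 항상 무게합 0으로 가능
--     for i in range(n+2):
--         T[i][0] = 0
--
--     for i in range(n, 0, -1):
--         # 현재 상자의 무게, 현재 상자의 허용 하중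
--         w,c = weights[i-1], capacities[i-1]
--         for k in range(1, n+1):
--             # 쌓는 상자 개수 1부터 N까지 반복
--             if T[i+1][k-1] <= c:
--                 # 현재 상자 i를 아래에 두고 K번째로 쌓기 가능
--                 T[i][k] = min(T[i + 1][k], T[i + 1][k - 1] + w)
--             else:
--                 T[i][k] = T[i + 1][k]
--
--     for k in range(n, -1, -1):
--         if T[1][k] != INF:
--             return k
--
--     return 0
-- ===== SOURCE B (Python) =====
-- def max_stackable_boxes(weights, capacities):
--     # Forward "headroom" DP: g[j] = the greatest achievable final slack
--     # (min over chosen boxes of capacity minus weight stacked above it)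
--     # over subsequences of j+1 boxes from the processed prefix.
--     g = []
--     for w, c in zip(weights, capacities):
--         cand = [c] + [min(r - w, c) for r in g]
--         g = [max(o, x) for o, x in zip(g, cand)] + [cand[-1]]
--     k = len(g)
--     while k > 0 and g[k - 1] < 0:
--         k -= 1
--     return k
-- ===== Notes on version B (the rewrite author's own statement) =====
-- stated objective: alternative
-- what changed: Replaces the backward 2-D minimum-weight-above DP table with a forward one-pass rolling DP over a 1-D list that maximizes the remaining capacity headroom per stack size.
import Mathlib
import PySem

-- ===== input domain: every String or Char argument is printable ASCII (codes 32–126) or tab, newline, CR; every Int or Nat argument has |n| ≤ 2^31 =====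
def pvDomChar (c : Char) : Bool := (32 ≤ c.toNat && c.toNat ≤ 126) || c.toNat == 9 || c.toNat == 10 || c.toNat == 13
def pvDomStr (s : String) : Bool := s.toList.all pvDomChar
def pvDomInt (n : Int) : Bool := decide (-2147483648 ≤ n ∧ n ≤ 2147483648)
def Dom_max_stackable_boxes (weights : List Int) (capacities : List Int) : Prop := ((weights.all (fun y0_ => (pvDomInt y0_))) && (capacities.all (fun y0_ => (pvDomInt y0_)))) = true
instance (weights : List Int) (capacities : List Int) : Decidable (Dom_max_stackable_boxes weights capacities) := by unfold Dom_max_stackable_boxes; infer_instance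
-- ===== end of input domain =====

-- B replaces A's backward 2-D minimum-weight-above DP table by a forward one-pass
-- rolling 1-D DP that maximizes the remaining capacity headroom per stack size
-- (objective: alternative; same O(n^2) time, O(n) space instead of O(n^2)).

-- ===== PORT A =====
-- A uses float('inf') only as a sentinel: every other table entry is an int, and the
-- only float operations are `INF <= c` (always False), `min(INF, x) = x` and `x != INF`.
-- We model entries as `Option Int` with `none = INF`; on these operations this is exact.
def pvBLe : Option Int → Int → Bool          -- `T[i+1][k-1] <= c` (INF <= c is False)
  | none, _ => false
  | some a, c => decide (a ≤ c)

def pvEMin : Option Int → Option Int → Option Int   -- `min` with none = INF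
  | none, b => b
  | some a, none => some a
  | some a, some b => some (min a b)

def pvEAdd : Option Int → Int → Option Int          -- `T[i+1][k-1] + w` (INF + w = INF)
  | none, _ => none
  | some a, w => some (a + w)

-- one iteration of A's outer loop: build row T[i] from row T[i+1] (`next`);
-- Python fills row[0] = 0 then assigns row[k] for k = 1..n (k = k0+1 below).
def pvRowStep (n : Nat) (w c : Int) (next : List (Option Int)) : List (Option Int) :=
  some 0 :: (List.range n).map (fun k0 =>
    if pvBLe (next.getD k0 none) c then
      pvEMin (next.getD (k0 + 1) none) (pvEAdd (next.getD k0 none) w)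
    else next.getD (k0 + 1) none)

-- `for k in range(n, -1, -1): if T[1][k] != INF: return k` / `return 0`;
-- at k = 0 the test `T[1][0] != INF` and the fallthrough both return 0, merged here.
def pvScanA (row : List (Option Int)) : Nat → Int
  | 0 => 0
  | k + 1 => if (row.getD (k + 1) none).isSome then ((k + 1 : Nat) : Int) else pvScanA row k

-- outer loop `for i in range(n, 0, -1): w, c = weights[i-1], capacities[i-1]`:
-- a right fold over the paired boxes (inside Pre_ the zip pairs exactly weights[i-1], capacities[i-1]).
def max_stackable_boxes (weights : List Int) (capacities : List Int) : Int :=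
  let n := weights.length
  let row1 := (weights.zip capacities).foldr (fun p next => pvRowStep n p.1 p.2 next)
      (some 0 :: List.replicate n none)
  pvScanA row1 n

-- ===== PORT B =====
-- one iteration of B's loop: cand = [c] + [min(r - w, c) for r in g];
-- g = [max(o, x) for o, x in zip(g, cand)] + [cand[-1]]
def pvStepB (g : List Int) (w c : Int) : List Int :=
  let cand := c :: g.map (fun r => min (r - w) c)
  (g.zip cand).map (fun oc => max oc.1 oc.2) ++ [cand.getLast (List.cons_ne_nil _ _)]

-- `k = len(g); while k > 0 and g[k-1] < 0: k -= 1; return k`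
def pvScanB (g : List Int) : Nat → Nat
  | 0 => 0
  | k + 1 => if g.getD k 0 < 0 then pvScanB g k else k + 1

def max_stackable_boxes_alt (weights : List Int) (capacities : List Int) : Int :=
  let g := (weights.zip capacities).foldl (fun g p => pvStepB g p.1 p.2) []
  ((pvScanB g g.length : Nat) : Int)

-- ===== PRECONDITION & SPEC =====
-- A indexes capacities[i-1] for i = 1..len(weights): it raises IndexError when
-- capacities is shorter than weights; exactly those inputs are excluded.
def Pre_max_stackable_boxes (weights : List Int) (capacities : List Int) : Prop :=
  weights.length ≤ capacities.length
instance (weights : List Int) (capacities : List Int) : Decidable (Pre_max_stackable_boxes weights capacities) := by unfold Pre_max_stackable_boxes; infer_instance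

def pvWitness_max_stackable_boxes : List Int × List Int := ([3, 1, 2], [0, 5, 2])

def Spec_max_stackable_boxes (weights : List Int) (capacities : List Int) (out : Int) : Prop := out = max_stackable_boxes_alt weights capacities
instance (weights : List Int) (capacities : List Int) (out : Int) : Decidable (Spec_max_stackable_boxes weights capacities out) := by unfold Spec_max_stackable_boxes; infer_instance

-- ===== CLAIM (what is proved, stated in full; the proofs are below) =====
def Claim_equal_max_stackable_boxes : Prop := ∀ (weights : List Int) (capacities : List Int), Dom_max_stackable_boxes weights capacities → Pre_max_stackable_boxes weights capacities → Spec_max_stackable_boxes weights capacities (max_stackable_boxes weights capacities)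

-- ===== LEMMAS AND PROOFS =====

def pvSumw : List (Int × Int) → Int
  | [] => 0
  | p :: t => p.1 + pvSumw t
def pvOk : List (Int × Int) → Prop
  | [] => True
  | p :: t => pvSumw t ≤ p.2 ∧ pvOk t
def pvPush (r : Option Int) (p : Int × Int) : Option Int :=
  some (match r with | none => p.2 | some r => min (r - p.1) p.2)
def pvHr (l : List (Int × Int)) : Option Int := l.foldl pvPush none
def pvGeZ : Option Int → Prop
  | none => True
  | some r => 0 ≤ r
def pvBudget : Option Int → Int → Prop
  | none, _ => True
  | some r, s => s ≤ r

theorem pv_slack_ok : ∀ (l : List (Int × Int)) (r₀ : Option Int),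
    pvGeZ (l.foldl pvPush r₀) ↔ (pvOk l ∧ pvBudget r₀ (pvSumw l)) := by
  intro l
  induction l with
  | nil => intro r₀; simp [pvOk, pvSumw, List.foldl]; cases r₀ <;> simp [pvGeZ, pvBudget]
  | cons p t ih =>
    intro r₀
    obtain ⟨w, c⟩ := p
    rw [List.foldl_cons, ih]
    cases r₀ <;> simp [pvPush, pvOk, pvSumw, pvBudget] <;> constructor <;> intro h <;>
      (try constructor) <;> (try tauto) <;> omega

theorem pvHr_geZ_iff_ok (l : List (Int × Int)) : pvGeZ (pvHr l) ↔ pvOk l := by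
  rw [pvHr, pv_slack_ok]; simp [pvBudget]

def pvMinChar (s : List (Int × Int)) (k : Nat) (o : Option Int) : Prop :=
  (o = none → ∀ l, l.Sublist s → l.length = k → ¬ pvOk l) ∧
  (∀ m, o = some m →
    (∃ l, l.Sublist s ∧ l.length = k ∧ pvOk l ∧ pvSumw l = m) ∧
    (∀ l, l.Sublist s → l.length = k → pvOk l → m ≤ pvSumw l))

def pvMaxChar (s : List (Int × Int)) (j : Nat) (v : Int) : Prop :=
  (∃ l, l.Sublist s ∧ l.length = j + 1 ∧ pvHr l = some v) ∧
  (∀ l r, l.Sublist s → l.length = j + 1 → pvHr l = some r → r ≤ v)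
def pvInvB (pre : List (Int × Int)) (g : List Int) : Prop :=
  g.length = pre.length ∧ ∀ j, j < g.length → pvMaxChar pre j (g.getD j 0)
theorem pvRowStep_getD_zero (n : Nat) (w c : Int) (next : List (Option Int)) :
    (pvRowStep n w c next).getD 0 none = some 0 := rfl

theorem pvRowStep_getD_succ (n : Nat) (w c : Int) (next : List (Option Int))
    (k0 : Nat) (h : k0 < n) :
    (pvRowStep n w c next).getD (k0 + 1) none =
      if pvBLe (next.getD k0 none) c then
        pvEMin (next.getD (k0 + 1) none) (pvEAdd (next.getD k0 none) w)
      else next.getD (k0 + 1) none := by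
  simp [pvRowStep, List.getD, h]

theorem pvRowA_char (n : Nat) :
    ∀ (s : List (Int × Int)) (k : Nat), k ≤ n →
      pvMinChar s k
        ((s.foldr (fun p next => pvRowStep n p.1 p.2 next)
          (some 0 :: List.replicate n none)).getD k none) := by
  intro s
  induction s with
  | nil =>
    intro k hk
    rw [List.foldr_nil]
    match k with
    | 0 =>
      refine ⟨by simp, fun m hm => ?_⟩
      simp only [List.getD] at hm
      simp at hm
      subst hm
      exact ⟨⟨[], List.Sublist.refl _, rfl, trivial, rfl⟩,
        fun l hl hlen _ => by rw [List.length_eq_zero_iff] at hlen; subst hlen; simp [pvSumw]⟩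
    | k + 1 =>
      have : (some (0:Int) :: List.replicate n none).getD (k + 1) none = none := by
        simp [List.getD]
      rw [this]
      refine ⟨fun _ l hl hlen => ?_, fun m hm => by simp at hm⟩
      rw [List.sublist_nil] at hl
      subst hl; simp at hlen
  | cons p t ih =>
    intro k hk
    obtain ⟨w, c⟩ := p
    rw [List.foldr_cons]
    set next := t.foldr (fun p next => pvRowStep n p.1 p.2 next) (some 0 :: List.replicate n none) with hnext
    match k with
    | 0 =>
      rw [pvRowStep_getD_zero]
      refine ⟨by simp, fun m hm => ?_⟩
      have : m = 0 := by simpa using hm.symm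
      subst this
      exact ⟨⟨[], List.nil_sublist _, rfl, trivial, rfl⟩,
        fun l hl hlen _ => by rw [List.length_eq_zero_iff] at hlen; subst hlen; simp [pvSumw]⟩
    | k + 1 =>
      have hk0 : k < n := by omega
      rw [pvRowStep_getD_succ n w c next k hk0]
      have ihk : pvMinChar t k (next.getD k none) := ih k (by omega)
      have ihk1 : pvMinChar t (k+1) (next.getD (k+1) none) := ih (k+1) hk
      -- case on the guard
      by_cases hg : pvBLe (next.getD k none) c
      · -- next[k] = some m1, m1 ≤ c
        obtain ⟨m1, hm1, hm1c⟩ : ∃ m1, next.getD k none = some m1 ∧ m1 ≤ c := by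
          cases h : next.getD k none with
          | none => rw [h] at hg; simp [pvBLe] at hg
          | some a => rw [h] at hg; simp [pvBLe] at hg; exact ⟨a, rfl, hg⟩
        obtain ⟨⟨l1, hl1s, hl1len, hl1ok, hl1sum⟩, hub1⟩ := ihk.2 m1 hm1
        rw [if_pos hg, hm1]
        cases hnk1 : next.getD (k+1) none with
        | none =>
          -- new = some (m1 + w)
          have hnone := ihk1.1 hnk1
          simp only [pvEMin, pvEAdd]
          refine ⟨by simp, fun m hm => ?_⟩
          have : m = m1 + w := by simpa using hm.symm
          subst this
          constructor
          · refine ⟨(w,c) :: l1, List.Sublist.cons₂ _ hl1s, by simp [hl1len], ⟨by rw [hl1sum]; exact hm1c, hl1ok⟩, by simp [pvSumw, hl1sum]; ring⟩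
          · intro l hl hlen hok
            rw [List.sublist_cons_iff] at hl
            rcases hl with hl | ⟨r, hr, hrs⟩
            · exact absurd hok (hnone l hl hlen)
            · subst hr
              obtain ⟨hsum, hok'⟩ := hok
              have := hub1 r hrs (by simpa using hlen) hok'
              simp [pvSumw]; omega
        | some m2 =>
          obtain ⟨⟨l2, hl2s, hl2len, hl2ok, hl2sum⟩, hub2⟩ := ihk1.2 m2 hnk1
          simp only [pvEMin, pvEAdd]
          refine ⟨by simp, fun m hm => ?_⟩
          have hmm : m = min m2 (m1 + w) := by simpa using hm.symm
          subst hmm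
          constructor
          · rcases le_total m2 (m1 + w) with hle | hle
            · exact ⟨l2, hl2s.trans (List.sublist_cons_self _ _), hl2len, hl2ok, by rw [hl2sum]; omega⟩
            · refine ⟨(w,c) :: l1, List.Sublist.cons₂ _ hl1s, by simp [hl1len], ⟨by rw [hl1sum]; exact hm1c, hl1ok⟩, ?_⟩
              simp [pvSumw, hl1sum]; omega
          · intro l hl hlen hok
            rw [List.sublist_cons_iff] at hl
            rcases hl with hl | ⟨r, hr, hrs⟩
            · have := hub2 l hl hlen hok; omega
            · subst hr
              obtain ⟨hsum, hok'⟩ := hok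
              have := hub1 r hrs (by simpa using hlen) hok'
              simp [pvSumw]; omega
      · -- guard false: next[k] none, or some m1 > c; new = next[k+1]
        rw [if_neg hg]
        have hnoext : ∀ r, r.Sublist t → r.length = k → pvOk r → ¬ pvSumw r ≤ c := by
          intro r hrs hrlen hrok hrc
          cases h : next.getD k none with
          | none => exact (ihk.1 h r hrs hrlen) hrok
          | some m1 =>
            rw [h] at hg; simp [pvBLe] at hg
            have := (ihk.2 m1 h).2 r hrs hrlen hrok
            omega
        constructor
        · intro hnone l hl hlen hok
          rw [List.sublist_cons_iff] at hl
          rcases hl with hl | ⟨r, hr, hrs⟩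
          · exact (ihk1.1 hnone l hl hlen) hok
          · subst hr
            obtain ⟨hsum, hok'⟩ := hok
            exact hnoext r hrs (by simpa using hlen) hok' (by simpa [pvSumw] using hsum)
        · intro m hm
          obtain ⟨⟨l2, hl2s, hl2len, hl2ok, hl2sum⟩, hub2⟩ := ihk1.2 m hm
          refine ⟨⟨l2, hl2s.trans (List.sublist_cons_self _ _), hl2len, hl2ok, hl2sum⟩, ?_⟩
          intro l hl hlen hok
          rw [List.sublist_cons_iff] at hl
          rcases hl with hl | ⟨r, hr, hrs⟩
          · exact hub2 l hl hlen hok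
          · subst hr
            obtain ⟨hsum, hok'⟩ := hok
            exact absurd hsum (hnoext r hrs (by simpa using hlen) hok')
theorem pvStepB_length (g : List Int) (w c : Int) : (pvStepB g w c).length = g.length + 1 := by
  simp [pvStepB]
theorem pvStepB_getD_zero (g : List Int) (w c : Int) (h : 0 < g.length) :
    (pvStepB g w c).getD 0 0 = max (g.getD 0 0) c := by
  cases g with
  | nil => simp at h
  | cons a g => simp [pvStepB, List.getD]
theorem pvStepB_getD_succ (g : List Int) (w c : Int) (j : Nat) (h : j + 1 < g.length) :
    (pvStepB g w c).getD (j+1) 0 = max (g.getD (j+1) 0) (min (g.getD j 0 - w) c) := by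
  have hz : j + 1 < (g.zip (c :: g.map (fun r => min (r - w) c))).length := by
    simp; omega
  rw [pvStepB]
  rw [List.getD_append _ _ _ _ (by simpa using hz)]
  rw [List.getD_eq_getElem _ _ (by simpa using hz)]
  simp [List.getElem_zip, h, Nat.lt_of_succ_lt h]
theorem pvStepB_getD_last_nil (w c : Int) : pvStepB [] w c = [c] := rfl
theorem pvStepB_getD_last (g : List Int) (w c : Int) (j : Nat) (h : g.length = j + 1) :
    (pvStepB g w c).getD (j + 1) 0 = min (g.getD j 0 - w) c := by
  rw [pvStepB]
  rw [List.getD_append_right _ _ _ _ (by simp [h])]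
  have hlen : (List.map (fun oc => max oc.1 oc.2) (g.zip (c :: g.map (fun r => min (r - w) c)))).length = j + 1 := by
    simp [h]
  rw [hlen]
  simp only [Nat.sub_self, List.getD_cons_zero]
  rw [List.getLast_eq_getElem]
  have hj : j < g.length := by omega
  simp [h]
theorem pvFoldl_some (t : List (Int × Int)) : ∀ (x : Int), ∃ v, t.foldl pvPush (some x) = some v := by
  induction t with
  | nil => exact fun x => ⟨x, rfl⟩
  | cons q t ih => intro x; rw [List.foldl_cons]; exact ih _
theorem pvHr_isSome (p : Int × Int) (t : List (Int × Int)) :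
    ∃ v, pvHr (p :: t) = some v := by
  rw [pvHr, List.foldl_cons]
  exact pvFoldl_some t p.2

theorem pv_sublist_snoc_iff (l s : List (Int × Int)) (a : Int × Int) :
    l.Sublist (s ++ [a]) ↔ l.Sublist s ∨ ∃ r, l = r ++ [a] ∧ r.Sublist s := by
  rw [List.sublist_append_iff]
  constructor
  · rintro ⟨l1, l2, rfl, h1, h2⟩
    rcases List.sublist_singleton.mp h2 with rfl | rfl
    · exact Or.inl (by simpa using h1)
    · exact Or.inr ⟨l1, rfl, h1⟩
  · rintro (h | ⟨r, rfl, hr⟩)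
    · exact ⟨l, [], by simp, h, List.nil_sublist _⟩
    · exact ⟨r, [a], rfl, hr, List.Sublist.refl _⟩

theorem pvHr_snoc (l : List (Int × Int)) (a : Int × Int) :
    pvHr (l ++ [a]) = pvPush (pvHr l) a := by
  rw [pvHr, List.foldl_append]; rfl

theorem pvHr_nonempty_some (l : List (Int × Int)) (h : l ≠ []) : ∃ v, pvHr l = some v := by
  cases l with
  | nil => exact absurd rfl h
  | cons p t => exact pvHr_isSome p t

theorem pvStepB_preserves (pre : List (Int × Int)) (g : List Int) (w c : Int)
    (h : pvInvB pre g) : pvInvB (pre ++ [(w, c)]) (pvStepB g w c) := by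
  obtain ⟨hlen, hchar⟩ := h
  refine ⟨by simp [pvStepB_length, hlen], ?_⟩
  intro j hj
  rw [pvStepB_length] at hj
  -- the extension candidate: slack of r ++ [(w,c)] from slack of r
  have hext : ∀ (r : List (Int × Int)) (v : Int), pvHr r = some v →
      pvHr (r ++ [(w, c)]) = some (min (v - w) c) := by
    intro r v hv; rw [pvHr_snoc, hv]; rfl
  match j, hj with
  | 0, _ =>
    by_cases h0 : 0 < g.length
    case neg =>
      have hg : g = [] := List.length_eq_zero_iff.mp (by omega)
      have hpre : pre = [] := by
        rw [hg] at hlen; exact List.length_eq_zero_iff.mp (by simpa using hlen.symm)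
      subst hpre
      rw [hg, pvStepB_getD_last_nil]
      simp only [List.getD_cons_zero]
      refine ⟨⟨[(w, c)], List.Sublist.refl _, rfl, rfl⟩, ?_⟩
      intro l r hl hllen hr
      rcases (pv_sublist_snoc_iff l [] _).mp hl with h' | ⟨r', rfl, hr'⟩
      · rw [List.sublist_nil] at h'; subst h'; simp at hllen
      · rw [List.sublist_nil] at hr'; subst hr'
        simp only [List.nil_append] at hr
        have : pvHr [(w, c)] = some c := rfl
        rw [this] at hr; injection hr with hr; omega
    case pos =>
      rw [pvStepB_getD_zero _ _ _ h0]
      obtain ⟨⟨l0, hl0s, hl0len, hl0hr⟩, hub0⟩ := hchar 0 h0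
      constructor
      · rcases le_total (g.getD 0 0) c with hle | hle
        · refine ⟨[(w, c)], ?_, rfl, by rw [max_eq_right hle]; rfl⟩
          exact ((List.nil_sublist pre).append (List.Sublist.refl _) : _)
        · exact ⟨l0, hl0s.trans (List.sublist_append_left _ _), hl0len,
            by rw [max_eq_left hle, ← hl0hr]⟩
      · intro l r hl hllen hr
        rcases (pv_sublist_snoc_iff l pre _).mp hl with h' | ⟨r', rfl, hr'⟩
        · have := hub0 l r h' hllen hr; omega
        · have : r' = [] := by simpa using hllen
          subst this
          simp only [List.nil_append] at hr
          have hc : pvHr [(w, c)] = some c := rfl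
          rw [hc] at hr; injection hr with hr; omega
  | j + 1, _ =>
    rcases Nat.lt_or_ge (j + 1) g.length with hlt | hge
    · -- interior slot
      rw [pvStepB_getD_succ _ _ _ _ hlt]
      obtain ⟨⟨l1, hl1s, hl1len, hl1hr⟩, hub1⟩ := hchar (j + 1) hlt
      obtain ⟨⟨l0, hl0s, hl0len, hl0hr⟩, hub0⟩ := hchar j (by omega)
      constructor
      · rcases le_total (g.getD (j+1) 0) (min (g.getD j 0 - w) c) with hle | hle
        · refine ⟨l0 ++ [(w, c)], hl0s.append (List.Sublist.refl _), by simp [hl0len],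
            by rw [max_eq_right hle]; exact hext l0 _ hl0hr⟩
        · exact ⟨l1, hl1s.trans (List.sublist_append_left _ _), hl1len,
            by rw [max_eq_left hle, ← hl1hr]⟩
      · intro l r hl hllen hr
        rcases (pv_sublist_snoc_iff l pre _).mp hl with h' | ⟨r', rfl, hr'⟩
        · have := hub1 l r h' hllen hr; omega
        · have hr'len : r'.length = j + 1 := by simpa using hllen
          obtain ⟨v, hv⟩ := pvHr_nonempty_some r' (by intro hnil; rw [hnil] at hr'len; simp at hr'len)
          have hvle := hub0 r' v hr' hr'len hv
          rw [hext r' v hv] at hr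
          injection hr with hr
          omega
    · -- new last slot: j + 1 = g.length
      have hgl : g.length = j + 1 := by omega
      rw [pvStepB_getD_last _ _ _ _ hgl]
      obtain ⟨⟨l0, hl0s, hl0len, hl0hr⟩, hub0⟩ := hchar j (by omega)
      constructor
      · exact ⟨l0 ++ [(w, c)], hl0s.append (List.Sublist.refl _), by simp [hl0len],
          hext l0 _ hl0hr⟩
      · intro l r hl hllen hr
        rcases (pv_sublist_snoc_iff l pre _).mp hl with h' | ⟨r', rfl, hr'⟩
        · have := h'.length_le; rw [hllen, ← hlen, hgl] at this; omega
        · have hr'len : r'.length = j + 1 := by simpa using hllen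
          obtain ⟨v, hv⟩ := pvHr_nonempty_some r' (by intro hnil; rw [hnil] at hr'len; simp at hr'len)
          have hvle := hub0 r' v hr' hr'len hv
          rw [hext r' v hv] at hr
          injection hr with hr
          omega

theorem pvFoldB_inv : ∀ (s pre : List (Int × Int)) (g : List Int), pvInvB pre g →
    pvInvB (pre ++ s) (s.foldl (fun g p => pvStepB g p.1 p.2) g) := by
  intro s
  induction s with
  | nil => intro pre g h; simpa using h
  | cons p t ih =>
    intro pre g h
    rw [List.foldl_cons]
    have := ih (pre ++ [p]) _ (pvStepB_preserves pre g p.1 p.2 h)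
    simpa [List.append_assoc] using this
theorem pvScan_eq (row : List (Option Int)) (g : List Int) :
    ∀ j, (∀ k, k ≤ j → ((row.getD k none).isSome ↔ (k = 0 ∨ 0 ≤ g.getD (k - 1) 0))) →
      pvScanA row j = ((pvScanB g j : Nat) : Int) := by
  intro j
  induction j with
  | zero => intro _; simp [pvScanA, pvScanB]
  | succ k ih =>
    intro h
    have hk := h (k + 1) (le_refl _)
    simp only [Nat.add_eq_zero_iff, Nat.add_sub_cancel] at hk
    rw [pvScanA, pvScanB]
    by_cases hs : (row.getD (k + 1) none).isSome
    · have hng : ¬ g.getD k 0 < 0 := by have := hk.mp hs; omega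
      rw [if_pos hs, if_neg hng]
    · have hg : g.getD k 0 < 0 := by
        by_contra hc; exact hs (hk.mpr (by omega))
      rw [if_neg hs, if_pos hg]
      exact ih (fun k' hk' => h k' (by omega))

-- feasibility of some k-stack inside s
def pvFeas (s : List (Int × Int)) (k : Nat) : Prop :=
  ∃ l, l.Sublist s ∧ l.length = k ∧ pvOk l

theorem pvRowA_isSome_iff (n : Nat) (s : List (Int × Int)) (k : Nat) (hk : k ≤ n) :
    ((s.foldr (fun p next => pvRowStep n p.1 p.2 next)
      (some 0 :: List.replicate n none)).getD k none).isSome ↔ pvFeas s k := by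
  have hchar := pvRowA_char n s k hk
  cases h : (s.foldr (fun p next => pvRowStep n p.1 p.2 next)
      (some 0 :: List.replicate n none)).getD k none with
  | none =>
    simp only [Option.isSome_none]
    constructor
    · intro hfalse; simp at hfalse
    · rintro ⟨l, hls, hlen, hok⟩; exact absurd hok (hchar.1 h l hls hlen)
  | some m =>
    simp only [Option.isSome_some]
    constructor
    · intro _
      obtain ⟨⟨l, hls, hlen, hok, _⟩, _⟩ := hchar.2 m h
      exact ⟨l, hls, hlen, hok⟩
    · intro _; trivial

theorem pvB_nonneg_iff (s : List (Int × Int)) (g : List Int) (hinv : pvInvB s g)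
    (k : Nat) (hk : k < g.length) : (0 ≤ g.getD k 0) ↔ pvFeas s (k + 1) := by
  obtain ⟨⟨l, hls, hlen, hhr⟩, hub⟩ := hinv.2 k hk
  constructor
  · intro h0
    refine ⟨l, hls, hlen, ?_⟩
    rw [← pvHr_geZ_iff_ok, hhr]
    exact h0
  · rintro ⟨l', hls', hlen', hok'⟩
    obtain ⟨r, hr⟩ := pvHr_nonempty_some l' (by intro hnil; rw [hnil] at hlen'; simp at hlen')
    have hge : pvGeZ (pvHr l') := (pvHr_geZ_iff_ok l').mpr hok'
    rw [hr] at hge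
    exact le_trans hge (hub l' r hls' hlen' hr)

-- ===== VERDICT (by name: the statement is the Claim_ definition above) =====
theorem max_stackable_boxes_spec : Claim_equal_max_stackable_boxes := by
  intro weights capacities _ hpre
  unfold Spec_max_stackable_boxes
  unfold Pre_max_stackable_boxes at hpre
  rw [max_stackable_boxes, max_stackable_boxes_alt]
  set pairs := weights.zip capacities with hpairs
  set n := weights.length with hn
  have hplen : pairs.length = n := by
    rw [hpairs, List.length_zip]; omega
  have hinv : pvInvB pairs ((pairs.foldl (fun g p => pvStepB g p.1 p.2) []))
      := by simpa using pvFoldB_inv pairs [] [] ⟨rfl, by simp⟩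
  have hglen : (pairs.foldl (fun g p => pvStepB g p.1 p.2) []).length = n := by
    rw [hinv.1, hplen]
  rw [hglen]
  apply pvScan_eq
  intro k hk
  match k with
  | 0 =>
    simp only [true_or, iff_true]
    have := pvRowA_isSome_iff n pairs 0 (Nat.zero_le n)
    rw [this]
    exact ⟨[], List.nil_sublist _, rfl, trivial⟩
  | k + 1 =>
    have h1 : k + 1 ≠ 0 := by omega
    simp only [h1, false_or, Nat.add_sub_cancel]
    rw [pvRowA_isSome_iff n pairs (k + 1) hk]
    rw [pvB_nonneg_iff pairs _ hinv k (by omega)]
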